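-- pv_equiv track=rewrite | github.com/rulehub/rulehub | tools/dependency_freshness.py | summary_from_entries
-- ===== SOURCE A (Python) =====
-- from typing import Dict, List, Optional, Tuple
--
-- def summary_from_entries(entries: List[Dict]) -> Dict:
--     total = len(entries)
--     up = sum(1 for e in entries if e.get("status") == "up-to-date")
--     avail = sum(1 for e in entries if e.get("status") == "update-available")
--     unknown = sum(1 for e in entries if e.get(
--         "status", "").startswith("unknown"))
--     sec = sum(1 for e in entries if e.get("notes")
--               and "security-critical" in (e.get("notes") or ""))
--     return {"total": total, "up_to_date": up, "update_available": avail, "unknown": unknown, "security_critical": sec}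
-- ===== SOURCE B (Python) =====
-- def summary_from_entries(entries):
--     up = avail = unknown = sec = 0
--     for e in entries:
--         status = e.get("status", "")
--         if status == "up-to-date":
--             up += 1
--         elif status == "update-available":
--             avail += 1
--         if status.startswith("unknown"):
--             unknown += 1
--         notes = e.get("notes")
--         if notes and "security-critical" in notes:
--             sec += 1
--     return {"total": len(entries), "up_to_date": up, "update_available": avail,
--             "unknown": unknown, "security_critical": sec}
-- ===== Notes on version B (the rewrite author's own statement) =====
-- stated objective: alternative
-- what changed: Replaces A's four separate generator-sum passes over entries with one single loop maintaining four counters, reading each entry's status once.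
import Mathlib
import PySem

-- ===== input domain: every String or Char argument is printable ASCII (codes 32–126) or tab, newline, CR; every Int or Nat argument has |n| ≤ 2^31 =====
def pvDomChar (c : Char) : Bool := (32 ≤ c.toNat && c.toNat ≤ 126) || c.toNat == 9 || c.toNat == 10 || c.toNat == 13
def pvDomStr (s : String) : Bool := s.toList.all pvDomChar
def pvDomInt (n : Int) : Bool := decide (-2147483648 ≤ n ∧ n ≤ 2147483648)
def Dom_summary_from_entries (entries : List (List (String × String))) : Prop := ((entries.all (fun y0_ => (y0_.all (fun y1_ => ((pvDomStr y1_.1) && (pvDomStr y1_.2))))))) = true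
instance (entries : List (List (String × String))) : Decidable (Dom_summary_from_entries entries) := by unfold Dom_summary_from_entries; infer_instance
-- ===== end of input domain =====

-- B replaces A's four separate counting passes over entries with one single loop
-- maintaining four counters (objective: alternative, same cost class).

-- ===== PORT A =====
-- the four comprehension predicates of A, one per sum(...)
def pvUpA (e : List (String × String)) : Bool :=
  (PySem.Dict.mk e).get? "status" == some "up-to-date"
def pvAvailA (e : List (String × String)) : Bool :=
  (PySem.Dict.mk e).get? "status" == some "update-available"
def pvUnknownA (e : List (String × String)) : Bool :=
  PySem.Str.startswith ((PySem.Dict.mk e).getD "status" "") "unknown"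
def pvSecA (e : List (String × String)) : Bool :=
  match (PySem.Dict.mk e).get? "notes" with
  | none => false                         -- e.get("notes") is None: falsy, `and` short-circuits
  | some n => decide (n ≠ "") && PySem.Str.isIn "security-critical" n

def summary_from_entries (entries : List (List (String × String))) : List (String × Int) :=
  let total : Int := entries.length
  let up : Int := entries.countP (fun e => pvUpA e)
  let avail : Int := entries.countP (fun e => pvAvailA e)
  let unknown : Int := entries.countP (fun e => pvUnknownA e)
  let sec : Int := entries.countP (fun e => pvSecA e)
  [("total", total), ("up_to_date", up), ("update_available", avail),
   ("unknown", unknown), ("security_critical", sec)]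

-- ===== PORT B =====
-- one step of B's single loop: status is read once, then the branches of Source B in order
def pvStepB (acc : Int × Int × Int × Int) (e : List (String × String)) : Int × Int × Int × Int :=
  let d := PySem.Dict.mk e
  let status := d.getD "status" ""
  let (up, avail, unknown, sec) := acc
  let (up, avail) :=
    if status == "up-to-date" then (up + 1, avail)
    else if status == "update-available" then (up, avail + 1)
    else (up, avail)
  let unknown := if PySem.Str.startswith status "unknown" then unknown + 1 else unknown
  let sec :=
    match d.get? "notes" with
    | none => sec
    | some n => if decide (n ≠ "") && PySem.Str.isIn "security-critical" n then sec + 1 else sec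
  (up, avail, unknown, sec)

def summary_from_entries_alt (entries : List (List (String × String))) : List (String × Int) :=
  let (up, avail, unknown, sec) := entries.foldl pvStepB (0, 0, 0, 0)
  [("total", (entries.length : Int)), ("up_to_date", up), ("update_available", avail),
   ("unknown", unknown), ("security_critical", sec)]

-- ===== PRECONDITION & SPEC =====
def Spec_summary_from_entries (entries : List (List (String × String))) (out : List (String × Int)) : Prop := out = summary_from_entries_alt entries
instance (entries : List (List (String × String))) (out : List (String × Int)) : Decidable (Spec_summary_from_entries entries out) := by unfold Spec_summary_from_entries; infer_instance

-- ===== CLAIM (what is proved, stated in full; the proofs are below) =====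
def Claim_equal_summary_from_entries : Prop := ∀ (entries : List (List (String × String))), Dom_summary_from_entries entries → Spec_summary_from_entries entries (summary_from_entries entries)

-- ===== LEMMAS AND PROOFS =====

-- B's `status == "up-to-date"` (default "") agrees with A's `get? == some "up-to-date"`
lemma pvUp_eq (e : List (String × String)) :
    ((PySem.Dict.mk e).getD "status" "" == "up-to-date") = pvUpA e := by
  unfold pvUpA
  rw [PySem.Dict.getD_eq_get?_getD]
  cases (PySem.Dict.mk e).get? "status" <;> simp

lemma pvAvail_eq (e : List (String × String)) :
    ((PySem.Dict.mk e).getD "status" "" == "update-available") = pvAvailA e := by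
  unfold pvAvailA
  rw [PySem.Dict.getD_eq_get?_getD]
  cases (PySem.Dict.mk e).get? "status" <;> simp

-- loop invariant: the fold adds the four A-counts to the accumulator
lemma pvFold_eq (es : List (List (String × String))) (a b c d : Int) :
    es.foldl pvStepB (a, b, c, d) =
      (a + es.countP (fun e => pvUpA e), b + es.countP (fun e => pvAvailA e),
       c + es.countP (fun e => pvUnknownA e), d + es.countP (fun e => pvSecA e)) := by
  induction es generalizing a b c d with
  | nil => simp
  | cons e es ih =>
    simp only [List.foldl_cons, List.countP_cons]
    rw [show List.foldl pvStepB (pvStepB (a, b, c, d) e) es =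
          List.foldl pvStepB (pvStepB (a, b, c, d) e) es from rfl]
    have hstep : pvStepB (a, b, c, d) e =
        (a + if pvUpA e then 1 else 0, b + if pvAvailA e then 1 else 0,
         c + if pvUnknownA e then 1 else 0, d + if pvSecA e then 1 else 0) := by
      unfold pvStepB
      simp only []
      rw [pvUp_eq, pvAvail_eq]
      unfold pvUnknownA pvSecA
      by_cases hu : pvUpA e
      · have hv : pvAvailA e = false := by
          unfold pvUpA at hu; unfold pvAvailA
          cases h : (PySem.Dict.mk e).get? "status" with
          | none => simp
          | some s => rw [h] at hu; simp at hu ⊢; simp [hu]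
        simp [hu, hv]
        cases (PySem.Dict.mk e).get? "notes" <;> simp <;>
          (and_intros <;> try (split_ifs <;> first | omega | tauto))
      · by_cases hv : pvAvailA e <;> simp [hu, hv] <;>
          cases (PySem.Dict.mk e).get? "notes" <;> simp <;>
          (and_intros <;> try (split_ifs <;> first | omega | tauto))
    rw [hstep, ih]
    simp only [Prod.mk.injEq]
    refine ⟨?_, ?_, ?_, ?_⟩ <;> (push_cast; split <;> omega)

-- ===== VERDICT (by name: the statement is the Claim_ definition above) =====
theorem summary_from_entries_spec : Claim_equal_summary_from_entries := by
  intro entries _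
  unfold Spec_summary_from_entries summary_from_entries summary_from_entries_alt
  rw [pvFold_eq]
  simp
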